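-- pv_equiv track=rewrite | github.com/guoyunqian/meteva_base | meteva_base/fun/combining.py | that_the_name_exists
-- ===== SOURCE A (Python) =====
-- def that_the_name_exists(list, value):
--     '''
--     that_the_name_exists判断value是否在list中  如果存在改value直到不在list中为止
--     :param list: 一个要素名列表
--     :param value:  要素名
--     :return:
--     '''
--     value = str(value)
--     list = [str(i) for i in list]
--     if value in list:
--         value = str(value) + 'x'
--         return that_the_name_exists(list, value)
--     else:
--         return value
-- ===== SOURCE B (Python) =====
-- def that_the_name_exists(list, value):
--     value = str(value)
--     items = [str(i) for i in list]
--     n = 0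
--     while value + 'x' * n in items:
--         n += 1
--     return value + 'x' * n
-- ===== Notes on version B (the rewrite author's own statement) =====
-- stated objective: simpler
-- what changed: Replaced the tail recursion (which re-stringifies the whole list on every call) with one preprocessing pass and an iterative counter loop testing value + 'x'*n.
import Mathlib
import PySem

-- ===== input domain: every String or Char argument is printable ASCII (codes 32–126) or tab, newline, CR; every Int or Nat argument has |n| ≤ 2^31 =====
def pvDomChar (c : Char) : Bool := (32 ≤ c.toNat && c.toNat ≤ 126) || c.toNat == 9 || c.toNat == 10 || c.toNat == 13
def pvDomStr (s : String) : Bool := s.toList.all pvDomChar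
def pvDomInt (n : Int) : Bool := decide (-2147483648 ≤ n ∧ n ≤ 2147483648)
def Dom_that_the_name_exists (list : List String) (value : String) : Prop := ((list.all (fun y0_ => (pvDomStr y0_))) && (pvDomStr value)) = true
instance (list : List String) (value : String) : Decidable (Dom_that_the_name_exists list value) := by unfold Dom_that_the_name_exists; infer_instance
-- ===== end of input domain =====

-- B replaces A's tail recursion (which re-stringifies the list each call) by one
-- preprocessing pass and an iterative counter loop testing value + 'x'*n: simpler decomposition.


-- longest string length in a list; used only for the termination measures
def pvMaxLen (l : List String) : Nat := l.foldr (fun s m => max s.length m) 0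

theorem pvMem_le_maxLen {s : String} {l : List String} (h : s ∈ l) : s.length ≤ pvMaxLen l := by
  induction l with
  | nil => cases h
  | cons a t ih =>
    cases h with
    | head => simp [pvMaxLen]
    | tail _ h' => exact le_trans (ih h') (by simp [pvMaxLen])

-- ===== PORT A =====
-- Python A: value = str(value); list = [str(i) for i in list] (identity on String inputs);
-- if value in list: recurse on value + 'x'; else return value.
def that_the_name_exists (list : List String) (value : String) : String :=
  if value ∈ list then that_the_name_exists list (value ++ "x") else value
termination_by pvMaxLen list + 1 - value.length
decreasing_by
  have h := pvMem_le_maxLen ‹value ∈ list›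
  have hx : (value ++ "x").length = value.length + 1 := by
    rw [String.length_append]; rfl
  omega

-- ===== PORT B =====
-- 'x' * n
def pvXRep (n : Nat) : String := String.ofList (List.replicate n 'x')

theorem pvXRep_length (n : Nat) : (pvXRep n).length = n := by
  simp [pvXRep]

-- B's while loop: while value + 'x'*n in items: n += 1; return value + 'x'*n
def pvBLoop (items : List String) (value : String) (n : Nat) : String :=
  if value ++ pvXRep n ∈ items then pvBLoop items value (n + 1) else value ++ pvXRep n
termination_by pvMaxLen items + 1 - (value.length + n)
decreasing_by
  have h := pvMem_le_maxLen ‹value ++ pvXRep n ∈ items›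
  rw [String.length_append, pvXRep_length] at h
  omega

def that_the_name_exists_alt (list : List String) (value : String) : String :=
  pvBLoop list value 0

-- ===== PRECONDITION & SPEC =====
def Spec_that_the_name_exists (list : List String) (value : String) (out : String) : Prop := out = that_the_name_exists_alt list value
instance (list : List String) (value : String) (out : String) : Decidable (Spec_that_the_name_exists list value out) := by unfold Spec_that_the_name_exists; infer_instance

-- ===== CLAIM (what is proved, stated in full; the proofs are below) =====
def Claim_equal_that_the_name_exists : Prop := ∀ (list : List String) (value : String), Dom_that_the_name_exists list value → Spec_that_the_name_exists list value (that_the_name_exists list value)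

-- ===== LEMMAS AND PROOFS =====

theorem pvXRep_zero : pvXRep 0 = "" := rfl

theorem pvXRep_succ (n : Nat) : pvXRep n ++ "x" = pvXRep (n + 1) := by
  have : ("x" : String) = String.ofList ['x'] := rfl
  rw [pvXRep, pvXRep, this, ← String.ofList_append, List.replicate_succ']

theorem pvKey (k : Nat) : ∀ (l : List String) (v : String) (n : Nat),
    pvMaxLen l + 1 - (v.length + n) ≤ k →
    that_the_name_exists l (v ++ pvXRep n) = pvBLoop l v n := by
  induction k with
  | zero =>
    intro l v n hk
    rw [that_the_name_exists, pvBLoop]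
    split_ifs with h
    · exact absurd (pvMem_le_maxLen h) (by
        rw [String.length_append, pvXRep_length]
        omega)
    · rfl
  | succ k ih =>
    intro l v n hk
    rw [that_the_name_exists, pvBLoop]
    split_ifs with h
    · have h1 := pvMem_le_maxLen h
      rw [String.length_append, pvXRep_length] at h1
      have hr : (v ++ pvXRep n) ++ "x" = v ++ pvXRep (n + 1) := by
        rw [String.append_assoc, pvXRep_succ]
      rw [hr]
      exact ih l v (n + 1) (by omega)
    · rfl

-- ===== VERDICT (by name: the statement is the Claim_ definition above) =====
theorem that_the_name_exists_spec : Claim_equal_that_the_name_exists := by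
  intro l v _
  unfold Spec_that_the_name_exists that_the_name_exists_alt
  have := pvKey (pvMaxLen l + 1) l v 0 (by omega)
  simpa [pvXRep_zero] using this
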